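-- pv_equiv track=rewrite | github.com/albact4/game | grid.py | solve
-- ===== SOURCE A (Python) =====
-- def is_valid_move(x, y, grid):
--     """Check if the move is within the grid bounds and the square is empty."""
--     return 0 <= x < 6 and 0 <= y < 6 and grid[x][y] == 0
--
-- def solve(grid, x, y, move_number, moves):
--     """Recursive backtracking function to fill the grid."""
--     if move_number > 36:
--         return True  # All numbers placed
--
--     # Check all possible moves (3 horizontal, 3 vertical, 2 diagonal)
--     for dx, dy in moves:
--         new_x, new_y = x + dx, y + dy
--         if is_valid_move(new_x, new_y, grid):
--             grid[new_x][new_y] = move_number  # Place the number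
--             if solve(grid, new_x, new_y, move_number + 1, moves):
--                 return True
--             # Backtrack
--             grid[new_x][new_y] = 0
--
--     return False
-- ===== SOURCE B (Python) =====
-- def solve(grid, x, y, move_number, moves):
--     """Iterative backtracking: explicit stack of frames replaces recursion.
--
--     Each frame holds (fx, fy, fm, next-move-index, cell-placed-for-this-frame).
--     Same move order and same in-place grid mutations as the recursive search.
--     """
--     n = len(moves)
--     stack = [[x, y, move_number, 0, None]]
--     while stack:
--         frame = stack[-1]
--         fx, fy, fm, i, cell = frame
--         if fm > 36:
--             return True
--         pushed = False
--         while i < n: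
--             dx, dy = moves[i]
--             i += 1
--             nx, ny = fx + dx, fy + dy
--             if 0 <= nx < 6 and 0 <= ny < 6 and grid[nx][ny] == 0:
--                 frame[3] = i
--                 grid[nx][ny] = fm
--                 stack.append([nx, ny, fm + 1, 0, (nx, ny)])
--                 pushed = True
--                 break
--         if not pushed:
--             stack.pop()
--             if cell is not None:
--                 cx, cy = cell
--                 grid[cx][cy] = 0
--     return False
-- ===== Notes on version B (the rewrite author's own statement) =====
-- stated objective: alternative
-- what changed: The recursive backtracking DFS is replaced by an iterative loop over an explicit stack of frames (position, move number, next move index, cell to undo), preserving move order and mutation order exactly.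
-- outside the precondition, e.g. on solve([[0]], 0, 0, 1, [(0, 0)]): A returns False, B returns False
import Mathlib
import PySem

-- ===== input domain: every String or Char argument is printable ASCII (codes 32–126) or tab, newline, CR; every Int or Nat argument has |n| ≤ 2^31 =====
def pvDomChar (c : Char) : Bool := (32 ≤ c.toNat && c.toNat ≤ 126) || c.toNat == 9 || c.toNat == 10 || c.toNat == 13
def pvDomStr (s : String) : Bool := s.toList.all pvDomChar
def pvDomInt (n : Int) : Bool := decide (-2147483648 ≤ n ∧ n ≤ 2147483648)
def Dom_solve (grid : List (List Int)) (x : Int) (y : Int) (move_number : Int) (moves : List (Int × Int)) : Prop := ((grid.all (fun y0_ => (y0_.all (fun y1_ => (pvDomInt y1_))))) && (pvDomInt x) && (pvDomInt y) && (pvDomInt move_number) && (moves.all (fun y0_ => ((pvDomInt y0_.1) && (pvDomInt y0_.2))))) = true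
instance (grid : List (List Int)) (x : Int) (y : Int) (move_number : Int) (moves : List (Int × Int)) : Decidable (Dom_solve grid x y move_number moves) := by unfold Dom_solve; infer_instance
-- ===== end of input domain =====

-- B replaces the recursive backtracking DFS by an iterative loop over an explicit stack of
-- frames; same move order, same search, same cost (objective: alternative decomposition).
-- Both Pythons mutate `grid` in place identically; the theorems here are about the return value
-- (mutation becomes threaded state in the ports).

-- ===== PORT A =====
-- shared cell accessors (mutation `grid[x][y] = v` / read `grid[x][y]`, only used under 0 ≤ x,y < 6)
def pvSet2 (g : List (List Int)) (x y v : Int) : List (List Int) :=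
  g.set x.toNat ((g[x.toNat]?.getD []).set y.toNat v)

def pvGet2 (g : List (List Int)) (x y : Int) : Int :=
  (g[x.toNat]?.getD [])[y.toNat]?.getD 0

-- `is_valid_move(x, y, grid)` (exact on Pre_solve inputs, where indexing is in range)
def is_valid_move (x y : Int) (g : List (List Int)) : Bool :=
  decide (0 ≤ x ∧ x < 6 ∧ 0 ≤ y ∧ y < 6) && (pvGet2 g x y == 0)

mutual
  -- `solve` of Source A: entry check, then the `for dx, dy in moves` loop (goA over the remaining moves)
  def solveA (grid : List (List Int)) (x y move_number : Int) (moves : List (Int × Int)) :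
      Bool × List (List Int) :=
    if h : move_number > 36 then (true, grid)
    else goA grid x y move_number moves moves (Int.not_lt.mp h)
  termination_by ((37 - move_number).toNat, moves.length + 1)
  decreasing_by simp [Prod.lex_def]

  def goA (grid : List (List Int)) (x y move_number : Int) (moves rem : List (Int × Int))
      (hm : move_number ≤ 36) : Bool × List (List Int) :=
    match rem with
    | [] => (false, grid)
    | (dx, dy) :: rest =>
      let nx := x + dx
      let ny := y + dy
      if is_valid_move nx ny grid then
        let r := solveA (pvSet2 grid nx ny move_number) nx ny (move_number + 1) moves
        if r.1 then (true, r.2)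
        else goA (pvSet2 r.2 nx ny 0) x y move_number moves rest hm
      else goA grid x y move_number moves rest hm
  termination_by ((37 - move_number).toNat, rem.length)
  decreasing_by
    · left; omega
    · right; simp
    · right; simp
end

def solve (grid : List (List Int)) (x : Int) (y : Int) (move_number : Int) (moves : List (Int × Int)) : Bool :=
  (solveA grid x y move_number moves).1

-- ===== PORT B =====
-- a frame is (fx, fy, fm, remaining moves to try, cell this frame placed — undone on pop)
def pvUndo (c : Option (Int × Int)) (g : List (List Int)) : List (List Int) :=
  match c with
  | none => g
  | some (cx, cy) => pvSet2 g cx cy 0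

-- termination potential for the stack machine
def pvC (n : Nat) : Nat → Nat
  | 0 => 1
  | k + 1 => 2 + n * pvC n k

def frameW (n : Nat) (f : Int × Int × Int × List (Int × Int) × Option (Int × Int)) : Nat :=
  1 + f.2.2.2.1.length * pvC n (37 - f.2.2.1).toNat

def stackW (n : Nat) (s : List (Int × Int × Int × List (Int × Int) × Option (Int × Int))) : Nat :=
  (s.map (frameW n)).sum

lemma pvC_pos (n k : Nat) : 1 ≤ pvC n k := by cases k <;> simp [pvC] <;> omega

lemma pvC_succ_of_le (n : Nat) (m : Int) (hm : m ≤ 36) :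
    pvC n (37 - m).toNat = 2 + n * pvC n (36 - m).toNat := by
  have h : (37 - m).toNat = (36 - m).toNat + 1 := by omega
  rw [h, pvC]

-- the loop of Source B: examine the top frame, scan its remaining moves, push or pop
def runB (grid : List (List Int)) (moves : List (Int × Int))
    (stack : List (Int × Int × Int × List (Int × Int) × Option (Int × Int))) :
    Bool × List (List Int) :=
  match stack with
  | [] => (false, grid)
  | (fx, fy, fm, rem, cell) :: rest =>
    if h : fm > 36 then (true, grid)
    else
      match rem with
      | [] => runB (pvUndo cell grid) moves rest
      | (dx, dy) :: rem' =>
        let nx := fx + dx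
        let ny := fy + dy
        if decide (0 ≤ nx ∧ nx < 6 ∧ 0 ≤ ny ∧ ny < 6) && (pvGet2 grid nx ny == 0) then
          runB (pvSet2 grid nx ny fm) moves
            ((nx, ny, fm + 1, moves, some (nx, ny)) :: (fx, fy, fm, rem', cell) :: rest)
        else runB grid moves ((fx, fy, fm, rem', cell) :: rest)
termination_by stackW moves.length stack
decreasing_by
  · simp [stackW, frameW]
  · simp [stackW, frameW]
    rw [pvC_succ_of_le moves.length fm (by omega)]
    have h1 : (37 - (fm + 1)).toNat = (36 - fm).toNat := by omega
    rw [h1]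
    have := pvC_pos moves.length (36 - fm).toNat
    nlinarith [Nat.mul_le_mul_left rem'.length (Nat.le_refl (pvC moves.length (36 - fm).toNat))]
  · simp [stackW, frameW]
    have := pvC_pos moves.length (37 - fm).toNat
    nlinarith

def solve_alt (grid : List (List Int)) (x : Int) (y : Int) (move_number : Int) (moves : List (Int × Int)) : Bool :=
  (runB grid moves [(x, y, move_number, moves, none)]).1

-- ===== PRECONDITION & SPEC =====
-- Pre_solve excludes inputs on which the search may index a missing cell of a grid smaller than
-- 6×6 (IndexError, path-dependent): it keeps full 6×6 grids, immediate-success calls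
-- (move_number > 36), and calls whose every first move leaves the 0..5 window (no cell is read).
def Pre_solve (grid : List (List Int)) (x : Int) (y : Int) (move_number : Int) (moves : List (Int × Int)) : Prop :=
  (6 ≤ grid.length ∧ ∀ row ∈ grid.take 6, 6 ≤ row.length)
  ∨ 36 < move_number
  ∨ (∀ p ∈ moves, ¬ (0 ≤ x + p.1 ∧ x + p.1 < 6 ∧ 0 ≤ y + p.2 ∧ y + p.2 < 6))
instance (grid : List (List Int)) (x : Int) (y : Int) (move_number : Int) (moves : List (Int × Int)) : Decidable (Pre_solve grid x y move_number moves) := by unfold Pre_solve; infer_instance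

def pvWitness_solve : List (List Int) × Int × Int × Int × (List (Int × Int)) :=
  ([[0,0,0,0,0,0],[0,0,0,0,0,0],[0,0,0,0,0,0],[0,0,0,0,0,0],[0,0,0,0,0,0],[0,0,0,0,0,0]],
   0, 0, 36, [(1, 1)])

def Spec_solve (grid : List (List Int)) (x : Int) (y : Int) (move_number : Int) (moves : List (Int × Int)) (out : Bool) : Prop := out = solve_alt grid x y move_number moves
instance (grid : List (List Int)) (x : Int) (y : Int) (move_number : Int) (moves : List (Int × Int)) (out : Bool) : Decidable (Spec_solve grid x y move_number moves out) := by unfold Spec_solve; infer_instance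

-- ===== CLAIM (what is proved, stated in full; the proofs are below) =====
def Claim_equal_solve : Prop := ∀ (grid : List (List Int)) (x : Int) (y : Int) (move_number : Int) (moves : List (Int × Int)), Dom_solve grid x y move_number moves → Pre_solve grid x y move_number moves → Spec_solve grid x y move_number moves (solve grid x y move_number moves)

-- ===== LEMMAS AND PROOFS =====

-- what one visit of a (nonempty-stack) state of the machine computes, phrased via A's loop goA
def rhsB (moves : List (Int × Int)) (g : List (List Int))
    (s : List (Int × Int × Int × List (Int × Int) × Option (Int × Int))) :
    Bool × List (List Int) :=
  match s with
  | [] => (false, g)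
  | (x, y, m, rem, c) :: rest =>
    if hm : m > 36 then (true, g)
    else
      match goA g x y m moves rem (Int.not_lt.mp hm) with
      | (true, g') => (true, g')
      | (false, g') => runB (pvUndo c g') moves rest

lemma stackW_cons (n : Nat) (f : Int × Int × Int × List (Int × Int) × Option (Int × Int)) s :
    stackW n (f :: s) = frameW n f + stackW n s := by simp [stackW]

-- the machine simulates the recursion: induction on the stack potential
lemma runB_eq (moves : List (Int × Int)) :
    ∀ (N : Nat) (s : List (Int × Int × Int × List (Int × Int) × Option (Int × Int)))
      (g : List (List Int)), stackW moves.length s ≤ N → runB g moves s = rhsB moves g s := by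
  intro N
  induction N with
  | zero =>
    intro s g hs
    match s with
    | [] => rw [runB, rhsB]
    | f :: rest =>
      exfalso
      have : 1 ≤ frameW moves.length f := by simp [frameW]
      rw [stackW_cons] at hs; omega
  | succ N ih =>
    intro s g hs
    match s with
    | [] => rw [runB, rhsB]
    | (fx, fy, fm, rem, cell) :: rest =>
      rw [runB.eq_def, rhsB]
      by_cases h36 : fm > 36
      · simp [h36]
      · simp only [h36, dite_false]
        match rem with
        | [] => rw [goA]
        | (dx, dy) :: rem' =>
          rw [goA]
          simp only []
          set nx := fx + dx with hnx
          set ny := fy + dy with hny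
          by_cases hv : is_valid_move nx ny g
          · have hv' : (decide (0 ≤ nx ∧ nx < 6 ∧ 0 ≤ ny ∧ ny < 6) && (pvGet2 g nx ny == 0)) = true := by
              simpa [is_valid_move] using hv
            simp only [hv, hv', if_true]
            -- measure drops for the pushed stack
            have hC := pvC_succ_of_le moves.length fm (by omega)
            have h1 : (37 - (fm + 1)).toNat = (36 - fm).toNat := by omega
            have hpos := pvC_pos moves.length (36 - fm).toNat
            have hexp : ((dx, dy) :: rem').length = rem'.length + 1 := by simp
            have hmeas : stackW moves.length
                ((nx, ny, fm + 1, moves, some (nx, ny)) :: (fx, fy, fm, rem', cell) :: rest) ≤ N := by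
              rw [stackW_cons] at hs ⊢
              rw [stackW_cons]
              simp only [frameW] at hs ⊢
              rw [hC, hexp] at hs
              rw [h1, hC]
              have hring : (rem'.length + 1) * (2 + moves.length * pvC moves.length (36 - fm).toNat)
                  = rem'.length * (2 + moves.length * pvC moves.length (36 - fm).toNat)
                    + (2 + moves.length * pvC moves.length (36 - fm).toNat) := by ring
              rw [hring] at hs
              linarith
            have hmeas' : stackW moves.length ((fx, fy, fm, rem', cell) :: rest) ≤ N := by
              rw [stackW_cons] at hs ⊢
              simp only [frameW] at hs ⊢
              rw [hexp] at hs
              have hK := pvC_pos moves.length (37 - fm).toNat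
              have hring : (rem'.length + 1) * pvC moves.length (37 - fm).toNat
                  = rem'.length * pvC moves.length (37 - fm).toNat
                    + pvC moves.length (37 - fm).toNat := by ring
              rw [hring] at hs
              linarith
            rw [ih _ _ hmeas, rhsB]
            rw [solveA]
            by_cases h37 : fm + 1 > 36
            · simp [h37]
            · simp only [h37, dite_false]
              rcases hgo : goA (pvSet2 g nx ny fm) nx ny (fm + 1) moves moves (Int.not_lt.mp h37) with ⟨b2, g2⟩
              match b2 with
              | true => simp
              | false =>
                simp only [Bool.false_eq_true, if_false]
                rw [show pvUndo (some (nx, ny)) g2 = pvSet2 g2 nx ny 0 from rfl]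
                rw [ih _ _ hmeas', rhsB]
                simp only [h36, dite_false]
          · have hv' : (decide (0 ≤ nx ∧ nx < 6 ∧ 0 ≤ ny ∧ ny < 6) && (pvGet2 g nx ny == 0)) = false := by
              simpa [is_valid_move] using hv
            simp only [hv, hv', if_false, Bool.false_eq_true]
            have hmeas' : stackW moves.length ((fx, fy, fm, rem', cell) :: rest) ≤ N := by
              rw [stackW_cons] at hs ⊢
              simp only [frameW] at hs ⊢
              have hK := pvC_pos moves.length (37 - fm).toNat
              have hexp : ((dx, dy) :: rem').length = rem'.length + 1 := by simp
              rw [hexp] at hs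
              have hring : (rem'.length + 1) * pvC moves.length (37 - fm).toNat
                  = rem'.length * pvC moves.length (37 - fm).toNat
                    + pvC moves.length (37 - fm).toNat := by ring
              rw [hring] at hs
              linarith
            rw [ih _ _ hmeas', rhsB]
            simp only [h36, dite_false]

-- ===== VERDICT (by name: the statement is the Claim_ definition above) =====
theorem solve_spec : Claim_equal_solve := by
  intro grid x y m moves _ _
  unfold Spec_solve solve solve_alt
  rw [runB_eq moves (stackW moves.length [(x, y, m, moves, none)]) _ _ (le_refl _), rhsB]
  rw [solveA]
  by_cases h36 : m > 36
  · simp [h36]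
  · simp only [h36, dite_false]
    rcases hgo : goA grid x y m moves moves (Int.not_lt.mp (by exact h36)) with ⟨b, g'⟩
    match b with
    | true => simp
    | false => simp [runB, pvUndo]
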